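-- pv_equiv track=rewrite | github.com/joshanashakya/dissertation | workspace/dataset/java-python/GeeksForGeeks/1073/A/2.py | isOddLength
-- ===== SOURCE A (Python) =====
-- def isOddLength(num):
--     count = 0
--     while (num > 0):
--         num = int (num / 10)
--         count += 1
--
--     if (count % 2 != 0):
--         return True
--
--     return False
-- ===== SOURCE B (Python) =====
-- def isOddLength(num):
--     return num > 0 and len(str(num)) % 2 == 1
-- ===== Notes on version B (the rewrite author's own statement) =====
-- stated objective: idiomatic
-- what changed: Replaces the divide-by-10 counting loop with a closed-form check on the length of the decimal string representation.
import Mathlib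
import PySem

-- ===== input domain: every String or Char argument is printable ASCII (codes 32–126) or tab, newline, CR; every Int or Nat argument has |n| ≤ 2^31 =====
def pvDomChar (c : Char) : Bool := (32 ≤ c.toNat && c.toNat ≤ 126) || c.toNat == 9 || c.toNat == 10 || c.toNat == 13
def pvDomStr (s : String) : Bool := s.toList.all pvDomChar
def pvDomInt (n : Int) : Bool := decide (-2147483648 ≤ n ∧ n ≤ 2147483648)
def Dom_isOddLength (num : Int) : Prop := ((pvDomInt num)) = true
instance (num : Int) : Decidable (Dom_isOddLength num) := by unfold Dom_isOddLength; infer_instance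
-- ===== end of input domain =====

-- B replaces A's divide-by-10 counting loop with an idiomatic check on len(str(num)); return value only, no side effects.

-- ===== PORT A =====
-- the 'while (num > 0): num = int(num / 10); count += 1' loop
def isOddLengthLoop (num count : Int) : Int :=
  if 0 < num then
    isOddLengthLoop (PySem.Int.truncdiv num 10) (count + 1)
  else count
termination_by num.toNat
decreasing_by
  have h1 : PySem.Int.truncdiv num 10 = num / 10 := Int.tdiv_eq_ediv_of_nonneg (by omega)
  rw [h1]
  omega

def isOddLength (num : Int) : Bool :=
  let count := isOddLengthLoop num 0
  if PySem.Int.mod count 2 ≠ 0 then true else false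

-- ===== PORT B =====
def isOddLength_alt (num : Int) : Bool :=
  decide (0 < num) && (PySem.Int.mod (PySem.Str.len (PySem.Int.toStr num)) 2 == 1)

-- ===== PRECONDITION & SPEC =====
def Spec_isOddLength (num : Int) (out : Bool) : Prop := out = isOddLength_alt num
instance (num : Int) (out : Bool) : Decidable (Spec_isOddLength num out) := by unfold Spec_isOddLength; infer_instance

-- ===== CLAIM (what is proved, stated in full; the proofs are below) =====
def Claim_equal_isOddLength : Prop := ∀ (num : Int), Dom_isOddLength num → Spec_isOddLength num (isOddLength num)

-- ===== LEMMAS AND PROOFS =====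

-- the mathematical digit count both programs compute
def digCount (n : Nat) : Nat :=
  if n = 0 then 0 else digCount (n / 10) + 1
termination_by n
decreasing_by exact Nat.div_lt_self (by omega) (by omega)

lemma loopA_eq_digCount (n : Nat) : ∀ c : Int, isOddLengthLoop (n : Int) c = c + digCount n := by
  induction n using Nat.strong_induction_on with
  | _ n ih =>
    intro c
    rw [isOddLengthLoop, digCount]
    by_cases h : n = 0
    · simp [h]
    · have hpos : (0 : Int) < (n : Int) := by omega
      rw [if_pos hpos, if_neg h]
      have htd : PySem.Int.truncdiv (n : Int) 10 = ((n / 10 : Nat) : Int) := by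
        rw [show PySem.Int.truncdiv (n : Int) 10 = (n : Int).tdiv 10 from rfl,
          Int.tdiv_eq_ediv_of_nonneg (by omega)]
        omega
      rw [htd, ih (n / 10) (Nat.div_lt_self (by omega) (by omega))]
      push_cast
      ring

lemma toDigitsCore_len (f : Nat) : ∀ n : Nat, 0 < n → n ≤ f →
    (Nat.toDigitsCore 10 (f + 1) n []).length = digCount n := by
  induction f with
  | zero => intro n h1 h2; omega
  | succ f ih =>
    intro n h1 h2
    by_cases h : n / 10 = 0
    · rw [show Nat.toDigitsCore 10 (f + 1 + 1) n [] = [Nat.digitChar (n % 10)] by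
        rw [Nat.toDigitsCore, if_pos h]]
      rw [digCount, if_neg (by omega), digCount, h]
      simp
    · have step : Nat.toDigitsCore 10 (f + 1 + 1) n []
          = Nat.toDigitsCore 10 (f + 1) (n / 10) [Nat.digitChar (n % 10)] := by
        rw [Nat.toDigitsCore, if_neg h]
      have hlt : n / 10 < n := Nat.div_lt_self h1 (by omega)
      have hdc : digCount n = digCount (n / 10) + 1 := by
        rw [digCount]; rw [if_neg (by omega)]
      rw [step, Nat.toDigitsCore_lens_eq, ih (n / 10) (by omega) (by omega), hdc]

lemma toStr_len_pos (n : Nat) (h : 0 < n) :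
    PySem.Str.len (PySem.Int.toStr (n : Int)) = (digCount n : Int) := by
  have h1 : (PySem.Int.toStr (n : Int)).toList = PySem.Int.toChars (n : Int) :=
    PySem.Int.toList_toStr _
  rw [PySem.Str.len, h1, PySem.Int.toChars, if_neg (by omega)]
  simp only [Int.toNat_natCast]
  rw [show Nat.toDigits 10 n = Nat.toDigitsCore 10 (n + 1) n [] from rfl,
    toDigitsCore_len n n h (le_refl n)]

-- ===== VERDICT (by name: the statement is the Claim_ definition above) =====
theorem isOddLength_spec : Claim_equal_isOddLength := by
  intro num _
  unfold Spec_isOddLength isOddLength isOddLength_alt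
  by_cases hpos : 0 < num
  · obtain ⟨n, rfl⟩ : ∃ n : Nat, num = (n : Int) := ⟨num.toNat, by omega⟩
    have hn : 0 < n := by omega
    rw [loopA_eq_digCount n 0, toStr_len_pos n hn]
    have hd : 0 < digCount n := by rw [digCount, if_neg (by omega)]; omega
    have hm : PySem.Int.mod (digCount n : Int) 2 = (digCount n : Int) % 2 :=
      PySem.Int.mod_eq_emod_of_pos (by omega)
    simp only [zero_add, hm, decide_eq_true hpos, Bool.true_and]
    rcases Int.emod_two_eq_zero_or_one (digCount n : Int) with h | h <;> simp [h]
  · have hle : num ≤ 0 := by omega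
    rw [isOddLengthLoop, if_neg hpos]
    simp [hpos, PySem.Int.mod]
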